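-- pv_equiv track=rewrite | github.com/a-gavriel/Python-Games | Clases/Clases-Ejecicios/c08.py | cuales_aux
-- ===== SOURCE A (Python) =====
-- def cuales_aux(num, resultado):
--     if num == 0:
--         return resultado
--     else:
--         ultimo = num%10
--         if ultimo < 5:
--             resultado =  [ultimo] + resultado
--         return cuales_aux(num//10, resultado)
-- ===== SOURCE B (Python) =====
-- def cuales_aux(num, resultado):
--     # Two phases: extract all decimal digits (least significant first),
--     # then keep the small ones in original order in front of the accumulator.
--     digits = []
--     while num != 0:
--         digits.append(num % 10)
--         num //= 10
--     return [d for d in reversed(digits) if d < 5] + resultado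
-- ===== Notes on version B (the rewrite author's own statement) =====
-- stated objective: alternative
-- what changed: Replaced the recursion that threads a conditionally-prepended accumulator through every call by a two-phase iterative version: first collect all digits least-significant-first into a plain list, then build the answer with a single reversed filtering comprehension prepended to the accumulator.
import Mathlib
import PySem

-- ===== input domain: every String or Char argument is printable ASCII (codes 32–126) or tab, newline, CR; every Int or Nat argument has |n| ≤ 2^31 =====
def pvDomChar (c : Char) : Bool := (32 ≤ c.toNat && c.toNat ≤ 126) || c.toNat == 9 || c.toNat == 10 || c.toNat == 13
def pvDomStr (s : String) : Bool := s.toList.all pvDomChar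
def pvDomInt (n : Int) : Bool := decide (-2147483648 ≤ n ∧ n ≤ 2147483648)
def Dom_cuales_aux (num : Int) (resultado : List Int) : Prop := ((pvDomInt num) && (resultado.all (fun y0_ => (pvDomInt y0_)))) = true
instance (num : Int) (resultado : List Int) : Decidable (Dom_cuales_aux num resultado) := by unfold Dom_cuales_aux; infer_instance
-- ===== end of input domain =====

-- B replaces A's accumulator-threading recursion by a two-phase loop (collect all digits, then filter);
-- same values on all num ≥ 0 (on num < 0 both Pythons never return, excluded by Pre_).

-- ===== PORT A =====
def cuales_aux (num : Int) (resultado : List Int) : List Int :=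
  if num = 0 then resultado
  else if num < 0 then resultado  -- Python recurses forever for num < 0 (RecursionError); Pre_ excludes this
  else
    let ultimo := PySem.Int.mod num 10
    let resultado' := if ultimo < 5 then ultimo :: resultado else resultado
    cuales_aux (PySem.Int.floordiv num 10) resultado'
termination_by num.toNat
decreasing_by
  rename_i h0 hneg
  rw [PySem.Int.floordiv_eq_ediv_of_pos (by omega)]
  omega

-- ===== PORT B =====
-- the 'while num != 0: digits.append(num % 10); num //= 10' loop of Source B
def pvDigitsLoop (num : Int) (digits : List Int) : List Int :=
  if num = 0 then digits
  else if num < 0 then digits  -- Python's while loop never terminates for num < 0; Pre_ excludes this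
  else pvDigitsLoop (PySem.Int.floordiv num 10) (digits ++ [PySem.Int.mod num 10])
termination_by num.toNat
decreasing_by
  rename_i h0 hneg
  rw [PySem.Int.floordiv_eq_ediv_of_pos (by omega)]
  omega

def cuales_aux_alt (num : Int) (resultado : List Int) : List Int :=
  ((pvDigitsLoop num []).reverse.filter (fun d => d < 5)) ++ resultado

-- ===== PRECONDITION & SPEC =====
-- A recurses forever (RecursionError) on num < 0, so only nonnegative num is admitted.
def Pre_cuales_aux (num : Int) (resultado : List Int) : Prop := 0 ≤ num
instance (num : Int) (resultado : List Int) : Decidable (Pre_cuales_aux num resultado) := by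
  unfold Pre_cuales_aux; infer_instance
def pvWitness_cuales_aux : Int × List Int := (407, [9])

def Spec_cuales_aux (num : Int) (resultado : List Int) (out : List Int) : Prop := out = cuales_aux_alt num resultado
instance (num : Int) (resultado : List Int) (out : List Int) : Decidable (Spec_cuales_aux num resultado out) := by unfold Spec_cuales_aux; infer_instance

-- ===== CLAIM (what is proved, stated in full; the proofs are below) =====
def Claim_equal_cuales_aux : Prop := ∀ (num : Int) (resultado : List Int), Dom_cuales_aux num resultado → Pre_cuales_aux num resultado → Spec_cuales_aux num resultado (cuales_aux num resultado)

-- ===== LEMMAS AND PROOFS =====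

lemma pvDigitsLoop_pos (num : Int) (acc : List Int) (h0 : num ≠ 0) (hneg : ¬ num < 0) :
    pvDigitsLoop num acc = pvDigitsLoop (PySem.Int.floordiv num 10) (acc ++ [PySem.Int.mod num 10]) := by
  rw [pvDigitsLoop]; simp [h0, hneg]

lemma cuales_aux_pos (num : Int) (res : List Int) (h0 : num ≠ 0) (hneg : ¬ num < 0) :
    cuales_aux num res = cuales_aux (PySem.Int.floordiv num 10)
      (if PySem.Int.mod num 10 < 5 then PySem.Int.mod num 10 :: res else res) := by
  rw [cuales_aux]; simp [h0, hneg]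

-- the digit-collecting loop only ever appends to its accumulator
lemma pvDigitsLoop_append (n : Nat) : ∀ (num : Int), num.toNat = n →
    ∀ (acc : List Int), pvDigitsLoop num acc = acc ++ pvDigitsLoop num [] := by
  induction n using Nat.strong_induction_on with
  | _ n ih =>
    intro num hn acc
    by_cases h0 : num = 0
    · simp [pvDigitsLoop, h0]
    · by_cases hneg : num < 0
      · simp [pvDigitsLoop, h0, hneg]
      · have hdec : (PySem.Int.floordiv num 10).toNat < n := by
          rw [PySem.Int.floordiv_eq_ediv_of_pos (by omega)]; omega
        rw [pvDigitsLoop_pos _ _ h0 hneg, pvDigitsLoop_pos _ [] h0 hneg,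
            ih _ hdec _ rfl (acc ++ [PySem.Int.mod num 10]),
            ih _ hdec _ rfl ([] ++ [PySem.Int.mod num 10])]
        simp

-- A's recursion computes exactly B's filtered, reversed digit list in front of the accumulator
lemma cuales_aux_eq_alt (n : Nat) : ∀ (num : Int), num.toNat = n → 0 ≤ num →
    ∀ (res : List Int), cuales_aux num res = cuales_aux_alt num res := by
  induction n using Nat.strong_induction_on with
  | _ n ih =>
    intro num hn hpos res
    by_cases h0 : num = 0
    · simp [cuales_aux, cuales_aux_alt, pvDigitsLoop, h0]
    · have hneg : ¬ num < 0 := by omega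
      have hdec : (PySem.Int.floordiv num 10).toNat < n := by
        rw [PySem.Int.floordiv_eq_ediv_of_pos (by omega)]; omega
      have hpos' : 0 ≤ PySem.Int.floordiv num 10 := by
        rw [PySem.Int.floordiv_eq_ediv_of_pos (by omega)]; omega
      rw [cuales_aux_pos _ _ h0 hneg, ih _ hdec _ rfl hpos']
      unfold cuales_aux_alt
      rw [pvDigitsLoop_pos _ [] h0 hneg,
          pvDigitsLoop_append (PySem.Int.floordiv num 10).toNat _ rfl ([] ++ [PySem.Int.mod num 10])]
      have hm : PySem.Int.mod num 10 = num % 10 := PySem.Int.mod_eq_emod_of_pos (by omega)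
      by_cases hu : num % 10 < 5 <;> simp [hu, hm, List.filter_append]

-- ===== VERDICT (by name: the statement is the Claim_ definition above) =====
theorem cuales_aux_spec : Claim_equal_cuales_aux := by
  intro num resultado _ hpre
  unfold Spec_cuales_aux
  exact cuales_aux_eq_alt num.toNat num rfl hpre resultado
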